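-- pv_equiv track=rewrite | github.com/flxj/ProjectEulerSolutions | p113.py | downnum
-- ===== SOURCE A (Python) =====
-- def downnum(low,high,n):
--     if high>low:
--         return 0
--     elif low==high:
--         return 1
--     else:
--         if n<2:
--             return 0
--         elif n==2:
--             return (low-high+2)*(low-high+1)//2
--         else:
--             cnt=0
--             for i in range(high,low+1):
--                 cnt+=downnum(low,i,n//2)*downnum(i,high,n//2)
--             return cnt
-- ===== SOURCE B (Python) =====
-- def downnum(low, high, n):
--     # The recursion depends only on d = low - high and on the halving chain of n:
--     # each splitting level squares the generating function (1-x)^-3 of the n==2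
--     # base case, so the answer is the single binomial coefficient C(d+s-1, d)
--     # with s = 3 * 2**(number of halvings until n reaches 2), and 0/1 if the
--     # chain bottoms out below 2.
--     d = low - high
--     if d < 0:
--         return 0
--     if d == 0:
--         return 1
--     if n < 2:
--         return 0
--     k = 0
--     m = n
--     while m > 2:
--         m //= 2
--         k += 1
--     if m < 2:
--         return 0
--     s = 3 * 2 ** k
--     r = min(d, s - 1)       # C(d+s-1, d) = C(d+s-1, s-1): iterate the smaller index
--     c = 1
--     for i in range(1, r + 1):
--         c = c * (d + s - 1 - r + i) // i
--     return c
-- ===== Notes on version B (the rewrite author's own statement) =====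
-- stated objective: alternative
-- what changed: B exploits that the recursion depends only on d=low-high and on the halving chain of n, replacing the recursive interval-splitting tree by a closed form: the answer is the single binomial coefficient C(d+s-1,d) with s=3*2^(number of halvings of n down to 2), or 0/1 when the chain bottoms out below 2.
import Mathlib
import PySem

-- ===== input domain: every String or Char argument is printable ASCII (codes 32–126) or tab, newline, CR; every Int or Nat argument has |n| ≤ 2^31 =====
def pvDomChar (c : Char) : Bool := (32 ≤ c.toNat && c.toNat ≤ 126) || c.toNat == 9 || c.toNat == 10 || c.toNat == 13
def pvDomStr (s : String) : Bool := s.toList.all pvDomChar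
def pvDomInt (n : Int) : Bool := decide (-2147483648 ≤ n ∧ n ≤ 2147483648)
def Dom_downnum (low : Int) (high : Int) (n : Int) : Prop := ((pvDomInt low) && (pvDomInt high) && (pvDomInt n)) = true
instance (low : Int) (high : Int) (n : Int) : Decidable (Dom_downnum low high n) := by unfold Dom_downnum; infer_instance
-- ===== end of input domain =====

-- B replaces A's recursive interval splitting by a closed form: a single binomial
-- coefficient determined by low-high and the halving chain of n (objective: alternative).

-- ===== PORT A =====
def downnum (low : Int) (high : Int) (n : Int) : Int :=
  if high > low then 0
  else if low = high then 1
  else if n < 2 then 0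
  else if n = 2 then PySem.Int.floordiv ((low - high + 2) * (low - high + 1)) 2
  else
    (PySem.List.pyRange high (low + 1) 1).foldl
      (fun cnt i =>
        cnt + downnum low i (PySem.Int.floordiv n 2) * downnum i high (PySem.Int.floordiv n 2)) 0
termination_by n.toNat
decreasing_by
  all_goals
    rw [PySem.Int.floordiv_eq_ediv_of_pos (by omega : (0:Int) < 2)]
    omega

-- ===== PORT B =====
-- the while loop: halve n until <= 2, counting halvings; returns (k, bottom)
def pvLevels (m : Int) : Nat × Int :=
  if m > 2 then
    let p := pvLevels (PySem.Int.floordiv m 2)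
    (p.1 + 1, p.2)
  else (0, m)
termination_by m.toNat
decreasing_by
  rw [PySem.Int.floordiv_eq_ediv_of_pos (by omega : (0:Int) < 2)]
  omega

def downnum_alt (low : Int) (high : Int) (n : Int) : Int :=
  if low - high < 0 then 0
  else if low - high = 0 then 1
  else if n < 2 then 0
  else
    let p := pvLevels n
    if p.2 < 2 then 0
    else
      let d := low - high
      let s : Int := 3 * 2 ^ p.1
      let r := min d (s - 1)
      (PySem.List.pyRange 1 (r + 1) 1).foldl
        (fun c i => PySem.Int.floordiv (c * (d + s - 1 - r + i)) i) 1

-- ===== PRECONDITION & SPEC =====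
def Spec_downnum (low : Int) (high : Int) (n : Int) (out : Int) : Prop := out = downnum_alt low high n
instance (low : Int) (high : Int) (n : Int) (out : Int) : Decidable (Spec_downnum low high n out) := by unfold Spec_downnum; infer_instance

-- ===== CLAIM (what is proved, stated in full; the proofs are below) =====
def Claim_equal_downnum : Prop := ∀ (low : Int) (high : Int) (n : Int), Dom_downnum low high n → Spec_downnum low high n (downnum low high n)

-- ===== LEMMAS AND PROOFS =====

-- reference function: A's recursion expressed on the difference d = low - high (≥ 0)
def gRef (d : Nat) (m : Int) : Int :=
  if d = 0 then 1
  else if m < 2 then 0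
  else if m = 2 then ((d : Int) + 2) * ((d : Int) + 1) / 2
  else ((List.range (d + 1)).map (fun j => gRef (d - j) (m / 2) * gRef j (m / 2))).sum
termination_by m.toNat
decreasing_by all_goals omega

theorem gRef_zero (m : Int) : gRef 0 m = 1 := by rw [gRef]; simp

theorem gRef_two (j : Nat) : gRef j 2 = ((j : Int) + 2) * ((j : Int) + 1) / 2 := by
  cases j with
  | zero => rw [gRef]; norm_num
  | succ k => rw [gRef]; norm_num

theorem gRef_small (j : Nat) (m : Int) (hj : j ≠ 0) (hm : m < 2) : gRef j m = 0 := by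
  rw [gRef, if_neg hj, if_pos hm]

-- ===== A-side: downnum computes gRef on the difference =====
theorem downnum_eq_gRef_fuel (t : Nat) :
    ∀ (n low high : Int), n.toNat ≤ t →
      downnum low high n = if high > low then 0 else gRef (low - high).toNat n := by
  induction t with
  | zero =>
    intro n low high ht
    rw [downnum]
    split_ifs with h1 h2 h3 h4
    · rfl
    · subst h2; simp [gRef_zero]
    · rw [gRef, if_neg (by omega : ¬ (low - high).toNat = 0), if_pos h3]
    · omega
    · omega
  | succ t ih =>
    intro n low high ht
    rw [downnum]
    split_ifs with h1 h2 h3 h4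
    · rfl
    · subst h2; simp [gRef_zero]
    · rw [gRef, if_neg (by omega : ¬ (low - high).toNat = 0), if_pos h3]
    · subst h4
      rw [PySem.Int.floordiv_eq_ediv_of_pos (by omega : (0:Int) < 2)]
      rw [gRef, if_neg (by omega : ¬ (low - high).toNat = 0),
          if_neg (by omega : ¬ (2:Int) < 2), if_pos rfl]
      have hd : (((low - high).toNat : Int)) = low - high := by omega
      rw [hd]
    · -- recursive branch: n ≥ 3, high < low
      have hlh : high < low := by omega
      have hn3 : 3 ≤ n := by omega
      rw [PySem.Int.floordiv_eq_ediv_of_pos (by omega : (0:Int) < 2)]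
      rw [PySem.List.foldl_add, PySem.List.pyRange_one]
      have hlen : (low + 1 - high).toNat = (low - high).toNat + 1 := by omega
      rw [hlen, List.map_map]
      rw [gRef, if_neg (by omega : ¬ (low - high).toNat = 0), if_neg h3, if_neg h4]
      rw [zero_add]
      congr 1
      refine List.map_congr_left ?_
      intro k hk
      rw [List.mem_range] at hk
      have hk' : k ≤ (low - high).toNat := by omega
      simp only [Function.comp]
      rw [ih (n / 2) low (high + k) (by omega),
          ih (n / 2) (high + k) high (by omega)]
      rw [if_neg (by omega : ¬ high + (k : Int) > low),
          if_neg (by omega : ¬ high > high + (k : Int))]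
      have e1 : (low - (high + (k : Int))).toNat = (low - high).toNat - k := by omega
      have e2 : (high + (k : Int) - high).toNat = k := by omega
      rw [e1, e2]

theorem downnum_eq_gRef (n low high : Int) :
    downnum low high n = if high > low then 0 else gRef (low - high).toNat n :=
  downnum_eq_gRef_fuel n.toNat n low high le_rfl

-- ===== combinatorial identities =====
theorem choose_congr {p q p' q' : Nat} (h1 : p = p') (h2 : q = q') :
    p.choose q = p'.choose q' := by rw [h1, h2]

-- hockey stick: sum of a diagonal of Pascal's triangle
theorem sum_choose_diag (a : Nat) : ∀ (n : Nat),
    ∑ k ∈ Finset.range (n + 1), (a + k).choose k = (a + n + 1).choose n := by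
  intro n
  induction n with
  | zero => simp
  | succ n ih =>
    rw [Finset.sum_range_succ, ih, show a + (n + 1) = a + n + 1 by omega,
      show a + n + 1 + 1 = (a + n + 1) + 1 from rfl, Nat.choose_succ_succ (a + n + 1) n]

-- convolution of two binomial diagonals
theorem conv_choose (a b d : Nat) :
    ∑ k ∈ Finset.range (d + 1), (a + k).choose k * (b + (d - k)).choose (d - k)
      = (a + b + d + 1).choose d := by
  induction d generalizing b with
  | zero => simp
  | succ d ihd =>
    induction b with
    | zero =>
      have h0 : ∀ k ∈ Finset.range (d + 1 + 1),
          (a + k).choose k * (0 + (d + 1 - k)).choose (d + 1 - k) = (a + k).choose k := by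
        intro k _
        simp [Nat.choose_self]
      rw [Finset.sum_congr rfl h0, sum_choose_diag a (d + 1),
        show a + 0 + (d + 1) + 1 = a + (d + 1) + 1 by omega]
    | succ b ihb =>
      have hpascal : ∀ k ∈ Finset.range (d + 1),
          (a + k).choose k * (b + 1 + (d + 1 - k)).choose (d + 1 - k)
            = (a + k).choose k * (b + 1 + (d - k)).choose (d - k)
              + (a + k).choose k * (b + (d + 1 - k)).choose (d + 1 - k) := by
        intro k hk
        rw [Finset.mem_range] at hk
        have e : (b + 1 + (d + 1 - k)).choose (d + 1 - k)
            = ((b + (d + 1 - k)) + 1).choose ((d - k) + 1) :=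
          choose_congr (by omega) (by omega)
        rw [e, Nat.choose_succ_succ (b + (d + 1 - k)) (d - k), Nat.mul_add]
        simp only [Nat.succ_eq_add_one]
        rw [choose_congr (show b + (d + 1 - k) = b + 1 + (d - k) by omega) (rfl : d - k = d - k),
          choose_congr (rfl : b + (d + 1 - k) = b + (d + 1 - k))
            (show (d - k) + 1 = d + 1 - k by omega)]
      rw [Finset.sum_range_succ, Finset.sum_congr rfl hpascal, Finset.sum_add_distrib, ihd (b + 1)]
      have hY : ∑ k ∈ Finset.range (d + 1),
            (a + k).choose k * (b + (d + 1 - k)).choose (d + 1 - k)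
          + (a + (d + 1)).choose (d + 1) * (b + 1 + (d + 1 - (d + 1))).choose (d + 1 - (d + 1))
          = (a + b + (d + 1) + 1).choose (d + 1) := by
        rw [← ihb]
        conv_rhs => rw [Finset.sum_range_succ]
        congr 1
        simp
      rw [add_assoc, hY,
        show a + (b + 1) + (d + 1) + 1 = (a + b + (d + 1) + 1) + 1 by omega,
        Nat.choose_succ_succ (a + b + (d + 1) + 1) d]
      simp only [Nat.succ_eq_add_one]
      rw [choose_congr (show a + (b + 1) + d + 1 = a + b + (d + 1) + 1 by omega)
        (rfl : d = d)]

-- list-range sums are Finset.range sums (definitional)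
theorem list_sum_eq_finset_sum (n : Nat) (f : Nat → Int) :
    ((List.range n).map f).sum = ∑ i ∈ Finset.range n, f i := rfl

-- bottom of the halving chain is at most 2
theorem pvLevels_snd_le (t : Nat) : ∀ (m : Int), m.toNat ≤ t → (pvLevels m).2 ≤ 2 := by
  induction t with
  | zero =>
    intro m ht
    rw [pvLevels, if_neg (by omega : ¬ m > 2)]
    show m ≤ 2
    omega
  | succ t ih =>
    intro m ht
    by_cases hm : m > 2
    · rw [pvLevels, if_pos hm, PySem.Int.floordiv_eq_ediv_of_pos (by omega : (0:Int) < 2)]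
      exact ih (m / 2) (by omega)
    · rw [pvLevels, if_neg hm]
      show m ≤ 2
      omega

-- gRef in closed form: a binomial coefficient when the chain bottoms at 2, else δ₀
theorem gRef_closed_fuel (t : Nat) :
    ∀ (m : Int) (d : Nat), m.toNat ≤ t →
      gRef d m = if (pvLevels m).2 = 2
        then (((d + 3 * 2 ^ (pvLevels m).1 - 1).choose d : Nat) : Int)
        else if d = 0 then 1 else 0 := by
  induction t with
  | zero =>
    intro m d ht
    rw [pvLevels, if_neg (by omega : ¬ m > 2)]
    rw [if_neg (by omega : ¬ ((0, m) : Nat × Int).2 = 2)]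
    by_cases hd : d = 0
    · subst hd; rw [gRef_zero, if_pos rfl]
    · rw [gRef_small d m hd (by omega), if_neg hd]
  | succ t ih =>
    intro m d ht
    by_cases hm : m > 2
    · -- recursive level
      rw [pvLevels, if_pos hm, PySem.Int.floordiv_eq_ediv_of_pos (by omega : (0:Int) < 2)]
      dsimp only
      by_cases hd : d = 0
      · subst hd
        rw [gRef_zero]
        by_cases hb2 : (pvLevels (m / 2)).2 = 2
        · rw [if_pos hb2, Nat.choose_zero_right]
          simp
        · rw [if_neg hb2, if_pos rfl]
      · rw [gRef, if_neg hd, if_neg (by omega : ¬ m < 2), if_neg (by omega : ¬ m = 2)]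
        by_cases hb : (pvLevels (m / 2)).2 = 2
        · -- binomial case: convolution of two diagonals
          rw [if_pos hb]
          have hterm : ∀ j ∈ List.range (d + 1),
              gRef (d - j) (m / 2) * gRef j (m / 2)
                = ((((3 * 2 ^ (pvLevels (m / 2)).1 - 1) + j).choose j : Nat) : Int)
                  * ((((3 * 2 ^ (pvLevels (m / 2)).1 - 1) + (d - j)).choose (d - j) : Nat) : Int) := by
            intro j hj
            rw [ih (m / 2) (d - j) (by omega), ih (m / 2) j (by omega), if_pos hb, if_pos hb]
            have ht3 : 3 ≤ 3 * 2 ^ (pvLevels (m / 2)).1 := by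
              have := Nat.one_le_two_pow (n := (pvLevels (m / 2)).1)
              omega
            rw [mul_comm]
            rw [choose_congr (show j + 3 * 2 ^ (pvLevels (m / 2)).1 - 1
                = (3 * 2 ^ (pvLevels (m / 2)).1 - 1) + j by omega) (rfl : j = j),
              choose_congr (show (d - j) + 3 * 2 ^ (pvLevels (m / 2)).1 - 1
                = (3 * 2 ^ (pvLevels (m / 2)).1 - 1) + (d - j) by omega) (rfl : d - j = d - j)]
          rw [List.map_congr_left hterm, list_sum_eq_finset_sum]
          have hcast : ∑ j ∈ Finset.range (d + 1),
                ((((3 * 2 ^ (pvLevels (m / 2)).1 - 1) + j).choose j : Nat) : Int)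
                  * ((((3 * 2 ^ (pvLevels (m / 2)).1 - 1) + (d - j)).choose (d - j) : Nat) : Int)
              = ((∑ j ∈ Finset.range (d + 1),
                  ((3 * 2 ^ (pvLevels (m / 2)).1 - 1) + j).choose j
                    * ((3 * 2 ^ (pvLevels (m / 2)).1 - 1) + (d - j)).choose (d - j) : Nat) : Int) := by
            push_cast
            rfl
          rw [hcast,
            conv_choose (3 * 2 ^ (pvLevels (m / 2)).1 - 1) (3 * 2 ^ (pvLevels (m / 2)).1 - 1) d]
          have ht3 : 3 ≤ 3 * 2 ^ (pvLevels (m / 2)).1 := by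
            have := Nat.one_le_two_pow (n := (pvLevels (m / 2)).1)
            omega
          have hpow : (2 : Nat) ^ ((pvLevels (m / 2)).1 + 1) = 2 ^ (pvLevels (m / 2)).1 * 2 := by
            ring
          congr 1
          exact choose_congr (by rw [hpow]; omega) rfl
        · -- delta case: every summand vanishes
          rw [if_neg hb, if_neg hd]
          apply List.sum_eq_zero
          intro x hx
          rw [List.mem_map] at hx
          obtain ⟨j, hj, hxe⟩ := hx
          rw [List.mem_range] at hj
          rw [← hxe, ih (m / 2) (d - j) (by omega), ih (m / 2) j (by omega),
            if_neg hb, if_neg hb]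
          by_cases hj0 : j = 0
          · rw [if_neg (by omega : ¬ d - j = 0)]; ring
          · rw [if_neg hj0]; ring
    · -- base level
      rw [pvLevels, if_neg hm]
      by_cases hm2 : m = 2
      · subst hm2
        rw [if_pos rfl]
        by_cases hd : d = 0
        · subst hd; rw [gRef_zero]; norm_num
        · rw [gRef_two d]
          rw [choose_congr (show d + 3 * 2 ^ (0 : Nat) - 1 = d + 2 by omega) (rfl : d = d)]
          have h2 : (d + 2).choose d = (d + 2).choose 2 := by
            have hsym := Nat.choose_symm (show 2 ≤ d + 2 by omega)
            rwa [show d + 2 - 2 = d by omega] at hsym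
          rw [h2, Nat.choose_two_right, show d + 2 - 1 = d + 1 by omega, Int.natCast_div]
          push_cast
          norm_num
      · rw [if_neg (by omega : ¬ ((0, m) : Nat × Int).2 = 2)]
        by_cases hd : d = 0
        · subst hd; rw [gRef_zero, if_pos rfl]
        · rw [gRef_small d m hd (by omega), if_neg hd]

-- the product loop of B computes a binomial coefficient
theorem binom_fold (x : Nat) (r : Nat) (hrx : r ≤ x) : ∀ (j : Nat), j ≤ r →
    (PySem.List.pyRange 1 ((j : Int) + 1) 1).foldl
        (fun c i => PySem.Int.floordiv (c * ((x : Int) - (r : Int) + i)) i) 1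
      = (((x - r + j).choose j : Nat) : Int) := by
  intro j
  induction j with
  | zero =>
    intro _
    rw [PySem.List.pyRange_one_eq_nil (by norm_num)]
    simp
  | succ j ihj =>
    intro hjr
    rw [show ((j + 1 : Nat) : Int) + 1 = ((j : Int) + 1) + 1 by push_cast; ring,
      PySem.List.pyRange_one_succ_right (by omega : (1 : Int) ≤ (j : Int) + 1),
      List.foldl_append, ihj (by omega)]
    simp only [List.foldl_cons, List.foldl_nil]
    rw [PySem.Int.floordiv_eq_ediv_of_pos (by omega : (0:Int) < (j : Int) + 1)]
    have hkey := Nat.add_one_mul_choose_eq (x - r + j) j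
    have hnat : ((x - r + j).choose j * (x - r + j + 1)) / (j + 1)
        = (x - r + (j + 1)).choose (j + 1) := by
      rw [Nat.mul_comm, hkey, Nat.mul_div_cancel _ (by omega : 0 < j + 1)]
      exact choose_congr (by omega) rfl
    have hint : ((x : Int) - (r : Int) + ((j : Int) + 1)) = ((x - r + j + 1 : Nat) : Int) := by
      push_cast [hrx]
      omega
    rw [hint, show ((j : Int) + 1) = ((j + 1 : Nat) : Int) by push_cast; ring,
      ← Int.natCast_mul, ← Int.natCast_div]
    exact_mod_cast hnat

-- ===== B-side: downnum_alt also computes gRef on the difference =====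
theorem downnum_alt_eq_gRef (low high n : Int) :
    downnum_alt low high n = if high > low then 0 else gRef (low - high).toNat n := by
  unfold downnum_alt
  dsimp only
  by_cases h1 : low - high < 0
  · rw [if_pos h1, if_pos (by omega : high > low)]
  · rw [if_neg h1, if_neg (by omega : ¬ high > low)]
    by_cases h2 : low - high = 0
    · rw [if_pos h2, h2]
      simp [gRef_zero]
    · rw [if_neg h2]
      by_cases h3 : n < 2
      · rw [if_pos h3, gRef, if_neg (by omega : ¬ (low - high).toNat = 0), if_pos h3]
      · rw [if_neg h3]
        have hble := pvLevels_snd_le n.toNat n le_rfl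
        rw [gRef_closed_fuel n.toNat n (low - high).toNat le_rfl]
        by_cases hp : (pvLevels n).2 < 2
        · rw [if_pos hp, if_neg (by omega : ¬ (pvLevels n).2 = 2),
            if_neg (by omega : ¬ (low - high).toNat = 0)]
        · rw [if_neg hp, if_pos (by omega : (pvLevels n).2 = 2)]
          have ht3 : 3 ≤ 3 * 2 ^ (pvLevels n).1 := by
            have := Nat.one_le_two_pow (n := (pvLevels n).1)
            omega
          have hpw : ((2 ^ (pvLevels n).1 : Nat) : Int) = 2 ^ (pvLevels n).1 := by
            push_cast
            ring
          have hd : low - high = (((low - high).toNat : Nat) : Int) := by omega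
          have hx : low - high + 3 * 2 ^ (pvLevels n).1 - 1
              = (((low - high).toNat + 3 * 2 ^ (pvLevels n).1 - 1 : Nat) : Int) := by
            rw [← hpw]
            omega
          have hr : min (low - high) (3 * 2 ^ (pvLevels n).1 - 1)
              = ((min (low - high).toNat (3 * 2 ^ (pvLevels n).1 - 1) : Nat) : Int) := by
            rw [← hpw]
            omega
          have hrx : min (low - high).toNat (3 * 2 ^ (pvLevels n).1 - 1)
              ≤ (low - high).toNat + 3 * 2 ^ (pvLevels n).1 - 1 := by omega
          rw [hr]
          have harg : ∀ i : Int, low - high + 3 * 2 ^ (pvLevels n).1 - 1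
                - ((min (low - high).toNat (3 * 2 ^ (pvLevels n).1 - 1) : Nat) : Int) + i
              = (((low - high).toNat + 3 * 2 ^ (pvLevels n).1 - 1 : Nat) : Int)
                - ((min (low - high).toNat (3 * 2 ^ (pvLevels n).1 - 1) : Nat) : Int) + i := by
            intro i
            rw [hx]
          simp only [harg]
          rw [binom_fold ((low - high).toNat + 3 * 2 ^ (pvLevels n).1 - 1)
            (min (low - high).toNat (3 * 2 ^ (pvLevels n).1 - 1)) hrx
            (min (low - high).toNat (3 * 2 ^ (pvLevels n).1 - 1)) le_rfl]
          congr 1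
          rw [show (low - high).toNat + 3 * 2 ^ (pvLevels n).1 - 1
              - min (low - high).toNat (3 * 2 ^ (pvLevels n).1 - 1)
              + min (low - high).toNat (3 * 2 ^ (pvLevels n).1 - 1)
              = (low - high).toNat + 3 * 2 ^ (pvLevels n).1 - 1 by omega]
          by_cases hds : (low - high).toNat ≤ 3 * 2 ^ (pvLevels n).1 - 1
          · rw [min_eq_left hds]
          · rw [min_eq_right (by omega)]
            have hsym := Nat.choose_symm
              (by omega : (low - high).toNat ≤ (low - high).toNat + 3 * 2 ^ (pvLevels n).1 - 1)
            rw [show (low - high).toNat + 3 * 2 ^ (pvLevels n).1 - 1 - (low - high).toNat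
                = 3 * 2 ^ (pvLevels n).1 - 1 by omega] at hsym
            rw [hsym]

-- ===== VERDICT (by name: the statement is the Claim_ definition above) =====
theorem downnum_spec : Claim_equal_downnum := by
  intro low high n _
  unfold Spec_downnum
  rw [downnum_eq_gRef, downnum_alt_eq_gRef]
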